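-- pv_equiv track=rewrite | github.com/JAEKts/oasis | src/oasis/repeater/editor.py | get_syntax_highlights
-- ===== SOURCE A (Python) =====
-- from typing import Dict, List, Optional, Tuple
--
-- def get_syntax_highlights(raw: str) -> List[Tuple[int, int, str]]:
--     """
--     Get syntax highlighting information for raw HTTP request.
--
--     Args:
--         raw: Raw HTTP request string
--
--     Returns:
--         List of (start_pos, end_pos, token_type) tuples
--     """
--     highlights: List[Tuple[int, int, str]] = []
--     lines = raw.split("\n")
--     pos = 0
--
--     if not lines:
--         return highlights
--
--     # Highlight request line
--     request_line = lines[0]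
--     parts = request_line.split(" ", 2)
--     if parts:
--         # Method
--         highlights.append((pos, pos + len(parts[0]), "method"))
--         pos += len(parts[0]) + 1
--
--         if len(parts) > 1:
--             # Path
--             highlights.append((pos, pos + len(parts[1]), "path"))
--             pos += len(parts[1]) + 1
--
--             if len(parts) > 2:
--                 # Version
--                 highlights.append((pos, pos + len(parts[2]), "version"))
--
--     pos = len(request_line) + 1
--
--     # Highlight headers
--     for line in lines[1:]:
--         if not line.strip():
--             pos += len(line) + 1
--             break
--
--         if ":" in line:
--             key, value = line.split(":", 1)
--             # Header name
--             highlights.append((pos, pos + len(key), "header_name"))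
--             pos += len(key) + 1
--             # Header value
--             highlights.append((pos, pos + len(value), "header_value"))
--             pos += len(value) + 1
--         else:
--             pos += len(line) + 1
--
--     # Body is everything after headers
--     if pos < len(raw):
--         highlights.append((pos, len(raw), "body"))
--
--     return highlights
-- ===== SOURCE B (Python) =====
-- from itertools import accumulate
-- from typing import List, Tuple
--
--
-- def get_syntax_highlights(raw: str) -> List[Tuple[int, int, str]]:
--     """Offset-table re-implementation: each line's absolute start comes from a
--     prefix-sum table instead of a threaded position counter."""
--     lines = raw.split("\n")
--     offsets = list(accumulate((len(l) + 1 for l in lines), initial=0))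
--
--     highlights: List[Tuple[int, int, str]] = []
--     p = 0
--     for part, token in zip(lines[0].split(" ", 2), ("method", "path", "version")):
--         highlights.append((p, p + len(part), token))
--         p += len(part) + 1
--
--     body_start = len(raw) + 1  # stays past the end when no blank separator line
--     for off, line in zip(offsets[1:], lines[1:]):
--         if not line.strip():
--             body_start = off + len(line) + 1
--             break
--         if ":" in line:
--             key, value = line.split(":", 1)
--             highlights.append((off, off + len(key), "header_name"))
--             highlights.append((off + len(key) + 1, off + len(key) + 1 + len(value), "header_value"))
--
--     if body_start < len(raw):
--         highlights.append((body_start, len(raw), "body"))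
--
--     return highlights
-- ===== Notes on version B (the rewrite author's own statement) =====
-- stated objective: alternative
-- what changed: B replaces A's single threaded position counter with a prefix table of line-start offsets (itertools.accumulate) and computes every header span from its line's own offset, defaulting body_start to len(raw)+1 instead of summing through the loop.
import Mathlib
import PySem

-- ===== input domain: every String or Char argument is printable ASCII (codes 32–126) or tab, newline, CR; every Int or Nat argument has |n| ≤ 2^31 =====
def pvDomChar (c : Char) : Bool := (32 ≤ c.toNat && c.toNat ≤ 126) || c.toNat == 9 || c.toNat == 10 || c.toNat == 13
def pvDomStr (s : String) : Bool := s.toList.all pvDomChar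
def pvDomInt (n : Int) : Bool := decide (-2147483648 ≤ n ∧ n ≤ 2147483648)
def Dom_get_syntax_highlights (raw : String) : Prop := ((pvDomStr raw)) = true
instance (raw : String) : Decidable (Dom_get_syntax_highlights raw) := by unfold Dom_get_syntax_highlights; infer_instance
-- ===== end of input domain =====

-- B replaces A's threaded position counter by a prefix table of line-start offsets (alternative decomposition; same cost).

-- ===== PORT A =====

-- request-line block of A: nested ifs over parts = request_line.split(" ", 2), threading pos from 0
def pvA_req (parts : List (List Char)) : List (Int × Int × String) :=
  match parts with
  | [] => []
  | p0 :: rest =>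
    let h0 : Int × Int × String := (0, (p0.length : Int), "method")
    match rest with
    | [] => [h0]
    | p1 :: rest2 =>
      let pos1 : Int := (p0.length : Int) + 1
      let h1 : Int × Int × String := (pos1, pos1 + p1.length, "path")
      match rest2 with
      | [] => [h0, h1]
      | p2 :: _ =>
        [h0, h1, (pos1 + p1.length + 1, pos1 + p1.length + 1 + p2.length, "version")]

-- A's header loop: threads pos, appends to highlights, breaks at the first blank line
def pvA_hdrs : List (List Char) → Int → List (Int × Int × String) →
    (List (Int × Int × String) × Int)
  | [], pos, acc => (acc, pos)
  | line :: rest, pos, acc =>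
    if PySem.Chars.strip line = [] then (acc, pos + line.length + 1)
    else if PySem.Chars.isIn [':'] line then
      match PySem.Chars.splitOnMax line [':'] 1 with
      | [key, value] =>
        pvA_hdrs rest (pos + key.length + 1 + value.length + 1)
          (acc ++ [(pos, pos + key.length, "header_name"),
                   (pos + key.length + 1, pos + key.length + 1 + value.length, "header_value")])
      | _ => (acc, pos)  -- unreachable: with ':' in line, split(":", 1) yields exactly two pieces
    else pvA_hdrs rest (pos + line.length + 1) acc

def get_syntax_highlights (raw : String) : List (Int × Int × String) :=
  let s := raw.toList
  let lines := PySem.Chars.splitOn s ['\n']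
  match lines with
  | [] => []                     -- 'if not lines: return highlights'
  | rl :: rest =>
    let hs := pvA_req (PySem.Chars.splitOnMax rl [' '] 2)
    let r := pvA_hdrs rest ((rl.length : Int) + 1) hs
    if r.2 < (s.length : Int) then r.1 ++ [(r.2, (s.length : Int), "body")] else r.1

-- ===== PORT B =====

-- request-line loop of B: zip(parts, ("method","path","version")) with a local running p
def pvB_req : List (List Char) → List String → Int → List (Int × Int × String)
  | part :: ps, tok :: ts, p =>
    (p, p + part.length, tok) :: pvB_req ps ts (p + part.length + 1)
  | _, _, _ => []

-- B's header loop over zip(offsets[1:], lines[1:]): spans from each line's own offset; returns (spans, body_start)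
def pvB_hdrs : List (Int × List Char) → Int → (List (Int × Int × String) × Int)
  | [], bs => ([], bs)
  | (off, line) :: rest, bs =>
    if PySem.Chars.strip line = [] then ([], off + line.length + 1)
    else if PySem.Chars.isIn [':'] line then
      match PySem.Chars.splitOnMax line [':'] 1 with
      | [key, value] =>
        let r := pvB_hdrs rest bs
        ((off, off + key.length, "header_name") ::
         (off + key.length + 1, off + key.length + 1 + value.length, "header_value") :: r.1, r.2)
      | _ => pvB_hdrs rest bs  -- unreachable: with ':' in line, split(":", 1) yields exactly two pieces
    else pvB_hdrs rest bs

def get_syntax_highlights_alt (raw : String) : List (Int × Int × String) :=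
  let s := raw.toList
  let lines := PySem.Chars.splitOn s ['\n']
  let offsets := List.scanl (fun a l => a + (l.length : Int) + 1) 0 lines
  match lines, offsets with
  | rl :: rest, _ :: offs =>
    let hl := pvB_req (PySem.Chars.splitOnMax rl [' '] 2) ["method", "path", "version"] 0
    let r := pvB_hdrs (offs.zip rest) ((s.length : Int) + 1)
    (hl ++ r.1) ++ (if r.2 < (s.length : Int) then [(r.2, (s.length : Int), "body")] else [])
  | _, _ => []  -- unreachable: str.split("\n") never returns an empty list

-- ===== PRECONDITION & SPEC =====
def Spec_get_syntax_highlights (raw : String) (out : List (Int × Int × String)) : Prop := out = get_syntax_highlights_alt raw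
instance (raw : String) (out : List (Int × Int × String)) : Decidable (Spec_get_syntax_highlights raw out) := by unfold Spec_get_syntax_highlights; infer_instance

-- ===== CLAIM (what is proved, stated in full; the proofs are below) =====
def Claim_equal_get_syntax_highlights : Prop := ∀ (raw : String), Dom_get_syntax_highlights raw → Spec_get_syntax_highlights raw (get_syntax_highlights raw)

-- ===== LEMMAS AND PROOFS =====

-- sum of (len + 1) over the pieces of a split
def pvF (ls : List (List Char)) : Int := (ls.map (fun l => (l.length : Int) + 1)).sum

theorem pvF_cons (l : List Char) (ls : List (List Char)) :
    pvF (l :: ls) = (l.length : Int) + 1 + pvF ls := by simp [pvF]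

theorem pvF_go (fuel : Nat) : ∀ (l cur : List Char) (acc : List (List Char)),
    pvF (PySem.Chars.splitOn.go ['\n'] fuel l cur acc) =
      pvF acc.reverse + cur.length + l.length + 1 := by
  induction fuel with
  | zero =>
    intro l cur acc
    simp only [PySem.Chars.splitOn.go]
    rw [show ((cur.reverse ++ l) :: acc).reverse = acc.reverse ++ [cur.reverse ++ l] by simp]
    simp [pvF]; ring
  | succ n ih =>
    intro l cur acc
    cases l with
    | nil =>
      simp only [PySem.Chars.splitOn.go]
      rw [show (cur.reverse :: acc).reverse = acc.reverse ++ [cur.reverse] by simp]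
      simp [pvF]; ring
    | cons c rest =>
      simp only [PySem.Chars.splitOn.go]
      simp only [List.isPrefixOf, List.isPrefixOf_iff_prefix] at *
      by_cases hc : c = '\n'
      · rw [if_pos (by simp [hc]), ih]
        rw [show (cur.reverse :: acc).reverse = acc.reverse ++ [cur.reverse] by simp]
        simp [pvF]; push_cast; ring
      · rw [if_neg (by simp [Ne.symm hc])]
        rw [ih]
        simp; push_cast; ring

theorem pvF_splitOn (s : List Char) :
    pvF (PySem.Chars.splitOn s ['\n']) = s.length + 1 := by
  simp only [PySem.Chars.splitOn]
  rw [pvF_go]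
  simp [pvF]

theorem pvGoColonTail (fuel : Nat) (l : List Char) (acc : List (List Char)) :
    PySem.Chars.splitOnMax.go [':'] fuel 0 l [] acc = acc.reverse ++ [l] := by
  cases fuel with
  | zero => simp [PySem.Chars.splitOnMax.go]
  | succ n =>
    cases l with
    | nil => simp [PySem.Chars.splitOnMax.go]
    | cons c rest => simp [PySem.Chars.splitOnMax.go]

theorem pvTakeWhile_lt (l : List Char) (h : ':' ∈ l) :
    (l.takeWhile (· ≠ ':')).length < l.length := by
  induction l with
  | nil => simp at h
  | cons c rest ih =>
    by_cases hc : c = ':'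
    · simp [hc, List.takeWhile]
    · simp only [List.takeWhile, hc]
      have hr : ':' ∈ rest := by
        rcases List.mem_cons.mp h with h1 | h1
        · exact absurd h1.symm hc
        · exact h1
      have h2 := ih hr
      simp only [ne_eq, decide_not] at h2 ⊢
      simp [hc, h2]

theorem pvGoColon (fuel : Nat) : ∀ (l cur : List Char) (acc : List (List Char)),
    ':' ∈ l → l.length < fuel →
    PySem.Chars.splitOnMax.go [':'] fuel 1 l cur acc =
      acc.reverse ++ [cur.reverse ++ l.takeWhile (· ≠ ':'),
        l.drop ((l.takeWhile (· ≠ ':')).length + 1)] := by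
  induction fuel with
  | zero => intro l cur acc _ hlen; omega
  | succ n ih =>
    intro l cur acc hmem hlen
    cases l with
    | nil => simp at hmem
    | cons c rest =>
      simp only [PySem.Chars.splitOnMax.go]
      by_cases hc : c = ':'
      · rw [if_neg (by simp), if_pos (by simp [hc])]
        simp only [List.length_cons, List.length_singleton, List.drop_succ_cons, List.drop_zero]
        rw [pvGoColonTail]
        simp [List.takeWhile, hc]
      · rw [if_neg (by simp), if_neg (by simp [Ne.symm hc])]
        have hr : ':' ∈ rest := by
          rcases List.mem_cons.mp hmem with h1 | h1
          · exact absurd h1.symm hc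
          · exact h1
        rw [ih rest (c :: cur) acc hr (by simpa using Nat.lt_of_succ_lt_succ hlen)]
        simp [List.takeWhile, hc]

theorem pvSplitColon (line : List Char) (h : PySem.Chars.isIn [':'] line = true) :
    PySem.Chars.splitOnMax line [':'] 1 =
      [line.takeWhile (· ≠ ':'), line.drop ((line.takeWhile (· ≠ ':')).length + 1)] := by
  have hmem : ':' ∈ line := by
    have h2 := (PySem.Chars.isIn_iff_infix _ _).mp h
    rcases h2 with ⟨a, b, hab⟩
    rw [← hab]; simp
  simp only [PySem.Chars.splitOnMax]
  rw [if_neg (by norm_num), show (1 : Int).toNat = 1 from rfl]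
  rw [pvGoColon (line.length + 1) line [] [] hmem (by omega)]
  simp

theorem pvColon_len (line : List Char) (h : PySem.Chars.isIn [':'] line = true) :
    ((line.takeWhile (· ≠ ':')).length : Int) + 1 +
      (line.drop ((line.takeWhile (· ≠ ':')).length + 1)).length + 1
      = (line.length : Int) + 1 := by
  have hmem : ':' ∈ line := by
    have h2 := (PySem.Chars.isIn_iff_infix _ _).mp h
    rcases h2 with ⟨a, b, hab⟩
    rw [← hab]; simp
  have := pvTakeWhile_lt line hmem
  simp only [List.length_drop]
  push_cast
  omega

theorem pv_req_eq (parts : List (List Char)) :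
    pvA_req parts = pvB_req parts ["method", "path", "version"] 0 := by
  rcases parts with _ | ⟨p0, _ | ⟨p1, _ | ⟨p2, rest⟩⟩⟩ <;>
    simp [pvA_req, pvB_req]

theorem pv_hdrs_eq : ∀ (ls : List (List Char)) (pos : Int) (acc : List (Int × Int × String)),
    pvA_hdrs ls pos acc =
      (acc ++ (pvB_hdrs ((List.scanl (fun a l => a + (l.length : Int) + 1) pos ls).zip ls) (pos + pvF ls)).1,
       (pvB_hdrs ((List.scanl (fun a l => a + (l.length : Int) + 1) pos ls).zip ls) (pos + pvF ls)).2) := by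
  intro ls
  induction ls with
  | nil => intro pos acc; simp [pvA_hdrs, pvB_hdrs, pvF]
  | cons l rest ih =>
    intro pos acc
    rw [List.scanl_cons, List.zip_cons_cons]
    by_cases hblank : PySem.Chars.strip l = []
    · simp [pvA_hdrs, pvB_hdrs, hblank]
    · by_cases hcolon : PySem.Chars.isIn [':'] l = true
      · have hlen := pvColon_len l hcolon
        simp only [pvA_hdrs, pvB_hdrs, hblank, hcolon, pvSplitColon l hcolon,
          if_neg hblank, if_pos hcolon]
        rw [ih]
        have hpos : pos + (l.takeWhile (· ≠ ':')).length + 1 +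
            (l.drop ((l.takeWhile (· ≠ ':')).length + 1)).length + 1 =
            pos + (l.length : Int) + 1 := by push_cast at hlen ⊢; omega
        rw [hpos, pvF_cons,
          show pos + ((l.length : Int) + 1 + pvF rest) = pos + l.length + 1 + pvF rest by ring]
        simp
      · simp only [pvA_hdrs, pvB_hdrs, if_neg hblank, if_neg hcolon]
        rw [ih, pvF_cons]
        rw [show pos + ((l.length : Int) + 1 + pvF rest) = pos + l.length + 1 + pvF rest by ring]

-- ===== VERDICT (by name: the statement is the Claim_ definition above) =====
theorem get_syntax_highlights_spec : Claim_equal_get_syntax_highlights := by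
  intro raw _
  unfold Spec_get_syntax_highlights
  simp only [get_syntax_highlights, get_syntax_highlights_alt]
  cases hl : PySem.Chars.splitOn raw.toList ['\n'] with
  | nil => simp
  | cons rl rest =>
    have hsum : ((rl.length : Int) + 1) + pvF rest = (raw.toList.length : Int) + 1 := by
      have h1 := pvF_splitOn raw.toList
      rw [hl, pvF_cons] at h1
      linarith
    simp only [List.scanl_cons, List.zip_cons_cons]
    rw [pv_req_eq, pv_hdrs_eq, show (0 : Int) + (rl.length : Int) + 1 = (rl.length : Int) + 1 by ring,
      hsum]
    simp only [String.length_toList] at hsum ⊢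
    split_ifs with hb
    · simp
    · simp
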